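-- pv_equiv track=rewrite | github.com/ryzhy1/Lab_1 | 20/20.py | get_almost_palindrom_count
-- ===== SOURCE A (Python) =====
-- def get_almost_palindrom_count(word: str, k: int):
--     char_changes = [[0 for _ in range(len(word))] for _ in range(len(word))]
--
--     counter = 0
--     for length in range(1, len(word) + 1):
--         for i in range(len(word) - length + 1):
--             j = i + length - 1
--             if length == 1:
--                 char_changes[i][j] = 0
--             elif length == 2:
--                 char_changes[i][j] = int(word[i] != word[j])
--             else:
--                 char_changes[i][j] = char_changes[i + 1][j - 1] + int(
--                     word[i] != word[j]
--                 )
--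
--             if char_changes[i][j] <= k:
--                 counter += 1
--
--     return counter
-- ===== SOURCE B (Python) =====
-- def get_almost_palindrom_count(word: str, k: int):
--     n = len(word)
--     counter = 0
--     for gap in (0, 1):
--         for center in range(n - gap):
--             left, right = center, center + gap
--             mismatches = 0
--             while left >= 0 and right < n:
--                 mismatches += int(word[left] != word[right])
--                 if mismatches <= k:
--                     counter += 1
--                 left -= 1
--                 right += 1
--     return counter
-- ===== Notes on version B (the rewrite author's own statement) =====
-- stated objective: faster
-- what changed: Replaced the O(n^2)-memory dynamic-programming table over substring lengths by an expand-around-center scan (2n-1 centers, running mismatch count), removing the table entirely.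
import Mathlib
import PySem

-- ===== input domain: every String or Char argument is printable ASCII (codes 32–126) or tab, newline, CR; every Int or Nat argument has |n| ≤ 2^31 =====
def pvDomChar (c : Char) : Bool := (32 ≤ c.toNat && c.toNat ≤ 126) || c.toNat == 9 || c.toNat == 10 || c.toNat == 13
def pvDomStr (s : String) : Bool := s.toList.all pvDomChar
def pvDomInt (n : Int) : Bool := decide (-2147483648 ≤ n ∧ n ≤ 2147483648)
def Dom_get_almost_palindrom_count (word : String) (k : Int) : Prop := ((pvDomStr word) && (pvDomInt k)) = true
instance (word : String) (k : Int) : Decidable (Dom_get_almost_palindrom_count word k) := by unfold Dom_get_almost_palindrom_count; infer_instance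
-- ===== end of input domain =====

-- B replaces A's O(n^2)-memory DP table by center expansion with a running mismatch count (same answers, O(1) extra memory).
-- ===== PORT A =====
def get_almost_palindrom_count (word : String) (k : Int) : Int :=
  let w := word.toList
  let n : Int := (w.length : Int)
  let table0 : List (List Int) :=
    (PySem.List.pyRange 0 n 1).map (fun _ => (PySem.List.pyRange 0 n 1).map (fun _ => (0 : Int)))
  let res := (PySem.List.pyRange 1 (n + 1) 1).foldl (fun st len =>
    (PySem.List.pyRange 0 (n - len + 1) 1).foldl (fun st i =>
      let tab := st.1
      let j := i + len - 1
      let v : Int :=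
        if len = 1 then 0
        else if len = 2 then (if PySem.List.pyGet? w i ≠ PySem.List.pyGet? w j then 1 else 0)
        else PySem.List.pyGetD (PySem.List.pyGetD tab (i + 1) []) (j - 1) 0 +
             (if PySem.List.pyGet? w i ≠ PySem.List.pyGet? w j then 1 else 0)
      let tab' := PySem.List.pySetD tab i (PySem.List.pySetD (PySem.List.pyGetD tab i []) j v)
      (tab', if v ≤ k then st.2 + 1 else st.2)) st) (table0, (0 : Int))
  res.2

-- ===== PORT B =====
-- while left >= 0 and right < n: left is carried as l1 = left + 1 in a Nat (the guard left >= 0 becomes l1 > 0); exact since left starts >= 0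
def pvExpandB (w : List Char) (k : Int) (l1 : Nat) (r m cnt : Int) : Int :=
  match l1 with
  | 0 => cnt
  | l0 + 1 =>
    if r < (w.length : Int) then
      let m' := m + (if PySem.List.pyGet? w (l0 : Int) ≠ PySem.List.pyGet? w r then 1 else 0)
      pvExpandB w k l0 (r + 1) m' (if m' ≤ k then cnt + 1 else cnt)
    else cnt

def get_almost_palindrom_count_alt (word : String) (k : Int) : Int :=
  let w := word.toList
  let n : Int := (w.length : Int)
  ([0, 1] : List Int).foldl (fun counter gap =>
    (PySem.List.pyRange 0 (n - gap) 1).foldl (fun counter center =>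
      pvExpandB w k (center + 1).toNat (center + gap) 0 counter) counter) 0

-- ===== PRECONDITION & SPEC =====
def Spec_get_almost_palindrom_count (word : String) (k : Int) (out : Int) : Prop := out = get_almost_palindrom_count_alt word k
instance (word : String) (k : Int) (out : Int) : Decidable (Spec_get_almost_palindrom_count word k out) := by unfold Spec_get_almost_palindrom_count; infer_instance

-- ===== CLAIM (what is proved, stated in full; the proofs are below) =====
def Claim_equal_get_almost_palindrom_count : Prop := ∀ (word : String) (k : Int), Dom_get_almost_palindrom_count word k → Spec_get_almost_palindrom_count word k (get_almost_palindrom_count word k)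

-- ===== LEMMAS AND PROOFS =====
def pvInd (w : List Char) (a b : Nat) : Int :=
  if PySem.List.pyGet? w (a : Int) ≠ PySem.List.pyGet? w (b : Int) then 1 else 0

def pvMism (w : List Char) (a b : Nat) : Int :=
  if a < b then pvMism w (a + 1) (b - 1) + pvInd w a b else 0
termination_by b - a
decreasing_by omega

def pvCnt (w : List Char) (k : Int) (a b : Nat) : Int := if pvMism w a b ≤ k then 1 else 0

-- count contributed by one expansion starting at (l1-1, b)
def pvArmE (w : List Char) (k : Int) (l1 b : Nat) : Int :=
  ∑ t ∈ Finset.range (min l1 (w.length - b)), pvCnt w k (l1 - 1 - t) (b + t)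

lemma pvMism_stop (w : List Char) (a b : Nat) (h : ¬ a < b) : pvMism w a b = 0 := by
  rw [pvMism]; simp [h]

lemma pvMism_rec (w : List Char) (a b : Nat) (h : a ≤ b) :
    pvMism w a b = pvMism w (a + 1) (b - 1) + pvInd w a b := by
  rcases Nat.lt_or_ge a b with h' | h'
  · rw [pvMism]; simp [h']
  · have hab : a = b := le_antisymm h h'
    subst hab
    rw [pvMism_stop w a a (by omega), pvMism_stop w (a+1) (a-1) (by omega)]
    simp [pvInd]

lemma pvExpandB_eq (w : List Char) (k : Int) :
    ∀ (l1 b : Nat) (m cnt : Int), l1 ≤ b + 1 → m = pvMism w l1 (b - 1) →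
    pvExpandB w k l1 (b : Int) m cnt = cnt + pvArmE w k l1 b := by
  intro l1
  induction l1 with
  | zero => intro b m cnt _ _; simp [pvExpandB, pvArmE]
  | succ l0 ih =>
    intro b m cnt hle hm
    rw [pvExpandB]
    by_cases hb : (b : Int) < (w.length : Int)
    · have hbn : b < w.length := by exact_mod_cast hb
      rw [if_pos hb]
      have hm' : m + (if PySem.List.pyGet? w (l0 : Int) ≠ PySem.List.pyGet? w (b : Int) then 1 else 0)
          = pvMism w l0 b := by
        rw [pvMism_rec w l0 b (by omega), hm]
        rfl
      have hcast : ((b : Int) + 1) = ((b + 1 : Nat) : Int) := by push_cast; ring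
      rw [hm', hcast, ih (b + 1) (pvMism w l0 b) _ (by omega) (by simp)]
      -- combine: cnt' + pvArmE l0 (b+1) = cnt + pvArmE (l0+1) b
      have hmin : min (l0 + 1) (w.length - b) = min l0 (w.length - (b + 1)) + 1 := by omega
      conv_rhs => rw [pvArmE, hmin, Finset.sum_range_succ']
      have hsum : ∀ t ∈ Finset.range (min l0 (w.length - (b + 1))),
          pvCnt w k (l0 + 1 - 1 - (t + 1)) (b + (t + 1)) = pvCnt w k (l0 - 1 - t) (b + 1 + t) := by
        intro t _
        have e1 : l0 + 1 - 1 - (t + 1) = l0 - 1 - t := by omega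
        have e2 : b + (t + 1) = b + 1 + t := by omega
        rw [e1, e2]
      rw [Finset.sum_congr rfl hsum]
      have : pvCnt w k (l0 + 1 - 1 - 0) (b + 0) = pvCnt w k l0 b := by
        have e1 : l0 + 1 - 1 - 0 = l0 := by omega
        have e2 : b + 0 = b := by omega
        rw [e1, e2]
      rw [this, pvArmE, pvCnt]
      by_cases hk : pvMism w l0 b ≤ k
      · simp only [if_pos hk]; ring
      · simp only [if_neg hk]; ring
    · rw [if_neg hb]
      have : min (l0 + 1) (w.length - b) = 0 := by
        have : w.length ≤ b := by exact_mod_cast not_lt.mp hb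
        omega
      simp [pvArmE, this]

def pvSide (w : List Char) (k : Int) (gap : Nat) : Int :=
  ∑ c ∈ Finset.range (w.length - gap), pvArmE w k (c + 1) (c + gap)

lemma pvFoldGap (w : List Char) (k : Int) (gap : Nat) (hg : gap ≤ 1) (init : Int) :
    (PySem.List.pyRange 0 ((w.length : Int) - (gap : Int)) 1).foldl (fun counter center =>
      pvExpandB w k (center + 1).toNat (center + (gap : Int)) 0 counter) init
    = init + pvSide w k gap := by
  rw [PySem.List.pyRange_one]
  rw [List.foldl_map]
  have hM : (((w.length : Int) - (gap : Int)) - 0).toNat = w.length - gap := by omega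
  rw [hM]
  have hcongr : ∀ (acc : Int) (c : Nat), c ∈ List.range (w.length - gap) →
      pvExpandB w k ((0 : Int) + (c : Int) + 1).toNat ((0 : Int) + (c : Int) + (gap : Int)) 0 acc
      = acc + pvArmE w k (c + 1) (c + gap) := by
    intro acc c _
    have h1 : ((0 : Int) + (c : Int) + 1).toNat = c + 1 := by omega
    have h2 : (0 : Int) + (c : Int) + (gap : Int) = ((c + gap : Nat) : Int) := by push_cast; ring
    rw [h1, h2, pvExpandB_eq w k (c + 1) (c + gap) 0 acc (by omega)
      (pvMism_stop w (c + 1) (c + gap - 1) (by omega)).symm]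
  rw [PySem.List.foldl_congr_mem _ _ _ _ hcongr, PySem.List.foldl_add]
  congr 1

lemma pvAlt_eq (word : String) (k : Int) :
    get_almost_palindrom_count_alt word k = pvSide word.toList k 0 + pvSide word.toList k 1 := by
  have h0 := pvFoldGap word.toList k 0 (by omega) 0
  have h1 := pvFoldGap word.toList k 1 (by omega) (0 + pvSide word.toList k 0)
  simp only [Nat.cast_zero, Nat.cast_one] at h0 h1
  simp only [get_almost_palindrom_count_alt, List.foldl_cons, List.foldl_nil]
  rw [h0, h1]
  ring

-- named form of A's inner-loop body (defeq to the lambda in the port)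
def pvStepA (w : List Char) (k len : Int) (st : List (List Int) × Int) (i : Int) :
    List (List Int) × Int :=
  let tab := st.1
  let j := i + len - 1
  let v : Int :=
    if len = 1 then 0
    else if len = 2 then (if PySem.List.pyGet? w i ≠ PySem.List.pyGet? w j then 1 else 0)
    else PySem.List.pyGetD (PySem.List.pyGetD tab (i + 1) []) (j - 1) 0 +
         (if PySem.List.pyGet? w i ≠ PySem.List.pyGet? w j then 1 else 0)
  let tab' := PySem.List.pySetD tab i (PySem.List.pySetD (PySem.List.pyGetD tab i []) j v)
  (tab', if v ≤ k then st.2 + 1 else st.2)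

def pvTabOK (w : List Char) (tab : List (List Int)) (L I : Nat) : Prop :=
  tab.length = w.length ∧ (∀ a, a < w.length → (tab.getD a []).length = w.length) ∧
  ∀ a b : Nat, (tab.getD a []).getD b 0 =
    if a ≤ b ∧ b < w.length ∧ (b + 1 - a < L ∨ (b + 1 - a = L ∧ a < I)) then pvMism w a b else 0

lemma pvGetDset {α : Type} (l : List α) (i : Nat) (v d : α) (hi : i < l.length) (a : Nat) :
    (l.set i v).getD a d = if a = i then v else l.getD a d := by
  rw [List.getD_eq_getElem?_getD, List.getD_eq_getElem?_getD, List.getElem?_set]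
  by_cases h : i = a
  · subst h; simp [hi]
  · simp [h, Ne.symm h]

lemma pvStepA_spec (w : List Char) (k : Int) (L0 I : Nat) (tab : List (List Int)) (cnt : Int)
    (hI : I < w.length - L0) (h : pvTabOK w tab (L0 + 1) I) :
    ∃ tab', pvTabOK w tab' (L0 + 1) (I + 1) ∧
      pvStepA w k (1 + (L0 : Int)) (tab, cnt) (0 + (I : Int))
        = (tab', cnt + pvCnt w k I (I + L0)) := by
  obtain ⟨hlen, hrow, hread⟩ := h
  have hIlen : I < w.length := by omega
  have hj : I + L0 < w.length := by omega
  have e2 : (I : Int) + (1 + (L0 : Int)) - 1 = ((I + L0 : Nat) : Int) := by push_cast; ring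
  have hv : (if (1 + (L0 : Int)) = 1 then 0
      else if (1 + (L0 : Int)) = 2 then
        (if PySem.List.pyGet? w (I : Int) ≠ PySem.List.pyGet? w ((I + L0 : Nat) : Int)
          then 1 else 0)
      else PySem.List.pyGetD (PySem.List.pyGetD tab ((I : Int) + 1) [])
            (((I + L0 : Nat) : Int) - 1) 0 +
           (if PySem.List.pyGet? w (I : Int) ≠ PySem.List.pyGet? w ((I + L0 : Nat) : Int)
            then 1 else 0))
      = pvMism w I (I + L0) := by
    rcases L0 with _ | L1
    · rw [if_pos (by norm_num)]
      rw [pvMism_stop w I (I + 0) (by omega)]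
    rcases L1 with _ | L2
    · rw [if_neg (by norm_num), if_pos (by norm_num)]
      rw [pvMism_rec w I (I + 1) (by omega), pvMism_stop w (I + 1) (I + 1 - 1) (by omega),
        pvInd]
      norm_num
    · rw [if_neg (by push_cast; omega), if_neg (by push_cast; omega)]
      have e4 : ((I + (L2 + 2) : Nat) : Int) - 1 = ((I + (L2 + 2) - 1 : Nat) : Int) := by
        push_cast; omega
      have e3 : (I : Int) + 1 = ((I + 1 : Nat) : Int) := by push_cast; ring
      rw [e3, e4, PySem.List.pyGetD_natCast, PySem.List.pyGetD_natCast,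
        hread (I + 1) (I + (L2 + 2) - 1), if_pos (by omega),
        pvMism_rec w I (I + (L2 + 2)) (by omega), pvInd]
  refine ⟨tab.set I ((tab.getD I []).set (I + L0) (pvMism w I (I + L0))), ⟨?_, ?_, ?_⟩, ?_⟩
  · rw [List.length_set]; exact hlen
  · intro a ha
    rw [pvGetDset tab I _ [] (by omega) a]
    by_cases hai : a = I
    · rw [if_pos hai, List.length_set]; exact hrow I hIlen
    · rw [if_neg hai]; exact hrow a ha
  · intro a b
    rw [pvGetDset tab I _ [] (by omega) a]
    by_cases hai : a = I
    · rw [if_pos hai]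
      have hrl : I + L0 < (tab.getD I []).length := by rw [hrow I hIlen]; exact hj
      rw [pvGetDset _ (I + L0) _ 0 hrl b]
      by_cases hb : b = I + L0
      · rw [if_pos hb, if_pos (by omega), hai, hb]
      · rw [if_neg hb, hread I b]
        have hiff : (I ≤ b ∧ b < w.length ∧ (b + 1 - I < L0 + 1 ∨ (b + 1 - I = L0 + 1 ∧ I < I)))
            ↔ (a ≤ b ∧ b < w.length ∧
                (b + 1 - a < L0 + 1 ∨ (b + 1 - a = L0 + 1 ∧ a < I + 1))) := by omega
        rw [if_congr hiff (by rw [← hai]) rfl]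
    · rw [if_neg hai, hread a b]
      have hiff : (a ≤ b ∧ b < w.length ∧ (b + 1 - a < L0 + 1 ∨ (b + 1 - a = L0 + 1 ∧ a < I)))
          ↔ (a ≤ b ∧ b < w.length ∧
              (b + 1 - a < L0 + 1 ∨ (b + 1 - a = L0 + 1 ∧ a < I + 1))) := by omega
      rw [if_congr hiff rfl rfl]
  · simp only [pvStepA, zero_add]
    rw [e2, hv]
    refine Prod.ext ?_ ?_
    · show PySem.List.pySetD tab (I : Int)
        (PySem.List.pySetD (PySem.List.pyGetD tab (I : Int) []) ((I + L0 : Nat) : Int)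
          (pvMism w I (I + L0))) = _
      rw [PySem.List.pyGetD_natCast, PySem.List.pySetD_natCast, PySem.List.pySetD_natCast]
    · show (if pvMism w I (I + L0) ≤ k then cnt + 1 else cnt) = _
      rw [pvCnt]
      split_ifs <;> ring

lemma pvInnerFold (w : List Char) (k : Int) (L0 : Nat) :
    ∀ I : Nat, I ≤ w.length - L0 → ∀ (tab : List (List Int)) (cnt : Int),
    pvTabOK w tab (L0 + 1) 0 →
    ∃ tab', pvTabOK w tab' (L0 + 1) I ∧
      List.foldl (pvStepA w k (1 + (L0 : Int))) (tab, cnt)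
          ((List.range I).map (fun x : Nat => 0 + (x : Int)))
        = (tab', cnt + ∑ i ∈ Finset.range I, pvCnt w k i (i + L0)) := by
  intro I
  induction I with
  | zero => intro _ tab cnt h; exact ⟨tab, h, by simp⟩
  | succ I ih =>
    intro hI tab cnt h
    obtain ⟨tab', h', heq⟩ := ih (by omega) tab cnt h
    obtain ⟨tab'', h'', hstep⟩ := pvStepA_spec w k L0 I tab'
      (cnt + ∑ i ∈ Finset.range I, pvCnt w k i (i + L0)) (by omega) h'
    refine ⟨tab'', h'', ?_⟩
    rw [List.range_succ, List.map_append, List.foldl_append, heq]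
    simp only [List.map_cons, List.map_nil, List.foldl_cons, List.foldl_nil]
    rw [hstep, Finset.sum_range_succ, add_assoc]

lemma pvRoll (w : List Char) (tab : List (List Int)) (L0 : Nat)
    (h : pvTabOK w tab (L0 + 1) (w.length - L0)) : pvTabOK w tab (L0 + 1 + 1) 0 := by
  obtain ⟨hlen, hrow, hread⟩ := h
  refine ⟨hlen, hrow, fun a b => ?_⟩
  rw [hread a b]
  have hiff : (a ≤ b ∧ b < w.length ∧
        (b + 1 - a < L0 + 1 ∨ (b + 1 - a = L0 + 1 ∧ a < w.length - L0)))
      ↔ (a ≤ b ∧ b < w.length ∧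
        (b + 1 - a < L0 + 1 + 1 ∨ (b + 1 - a = L0 + 1 + 1 ∧ a < 0))) := by omega
  rw [if_congr hiff rfl rfl]

lemma pvZeroRow (xs : List Int) (b : Nat) : (xs.map (fun _ => (0 : Int))).getD b 0 = 0 := by
  induction xs generalizing b with
  | nil => simp
  | cons x xs ih =>
    cases b with
    | zero => simp [List.getD]
    | succ b => simp only [List.getD]; exact ih b

def pvACount (w : List Char) (k : Int) (L : Nat) : Int :=
  ∑ l ∈ Finset.range L, ∑ i ∈ Finset.range (w.length - l), pvCnt w k i (i + l)

lemma pvTab0 (w : List Char) :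
    pvTabOK w ((PySem.List.pyRange 0 (w.length : Int) 1).map
      (fun _ => (PySem.List.pyRange 0 (w.length : Int) 1).map (fun _ => (0 : Int)))) 1 0 := by
  have hlen : ((PySem.List.pyRange 0 (w.length : Int) 1).map
      (fun _ => (PySem.List.pyRange 0 (w.length : Int) 1).map (fun _ => (0 : Int)))).length
      = w.length := by
    rw [List.length_map, PySem.List.length_pyRange_one]; omega
  refine ⟨hlen, ?_, ?_⟩
  · intro a ha
    rw [List.getD_eq_getElem?_getD, List.getElem?_map]
    have : a < (PySem.List.pyRange 0 (w.length : Int) 1).length := by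
      rw [PySem.List.length_pyRange_one]; omega
    rw [List.getElem?_eq_getElem this]
    simp only [Option.map_some, Option.getD_some, List.length_map]
    rw [PySem.List.length_pyRange_one]; omega
  · intro a b
    have hcond : ¬ (a ≤ b ∧ b < w.length ∧ (b + 1 - a < 1 ∨ (b + 1 - a = 1 ∧ a < 0))) := by omega
    rw [if_neg hcond]
    by_cases ha : a < w.length
    · have hrowval : ((PySem.List.pyRange 0 (w.length : Int) 1).map
          (fun _ => (PySem.List.pyRange 0 (w.length : Int) 1).map (fun _ => (0 : Int)))).getD a []
          = (PySem.List.pyRange 0 (w.length : Int) 1).map (fun _ => (0 : Int)) := by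
        have : a < (PySem.List.pyRange 0 (w.length : Int) 1).length := by
          rw [PySem.List.length_pyRange_one]; omega
        rw [List.getD_eq_getElem?_getD, List.getElem?_map, List.getElem?_eq_getElem this]
        simp
      rw [hrowval]
      exact pvZeroRow _ b
    · have hrowval : ((PySem.List.pyRange 0 (w.length : Int) 1).map
          (fun _ => (PySem.List.pyRange 0 (w.length : Int) 1).map (fun _ => (0 : Int)))).getD a []
          = [] := by
        rw [List.getD_eq_getElem?_getD, List.getElem?_eq_none]
        · simp
        · rw [List.length_map, PySem.List.length_pyRange_one]; omega
      rw [hrowval]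
      simp

lemma pvOuterFold (w : List Char) (k : Int) :
    ∀ L : Nat, L ≤ w.length →
    ∃ tab, pvTabOK w tab (L + 1) 0 ∧
      List.foldl (fun st x => List.foldl (pvStepA w k x) st
          (PySem.List.pyRange 0 ((w.length : Int) - x + 1) 1))
        ((PySem.List.pyRange 0 (w.length : Int) 1).map
          (fun _ => (PySem.List.pyRange 0 (w.length : Int) 1).map (fun _ => (0 : Int))), 0)
        ((List.range L).map (fun x : Nat => 1 + (x : Int)))
      = (tab, pvACount w k L) := by
  intro L
  induction L with
  | zero => exact fun _ => ⟨_, pvTab0 w, by simp [pvACount]⟩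
  | succ L ih =>
    intro hL
    obtain ⟨tab, h, heq⟩ := ih (by omega)
    rw [List.range_succ, List.map_append, List.foldl_append, heq]
    simp only [List.map_cons, List.map_nil, List.foldl_cons, List.foldl_nil]
    have hr : PySem.List.pyRange 0 ((w.length : Int) - (1 + (L : Int)) + 1) 1
        = (List.range (w.length - L)).map (fun x : Nat => 0 + (x : Int)) := by
      have ht : (((w.length : Int) - (1 + (L : Int)) + 1) - 0).toNat = w.length - L := by omega
      rw [PySem.List.pyRange_one, ht]
    rw [hr]
    obtain ⟨tab', h', heq'⟩ := pvInnerFold w k L (w.length - L) (by omega) tab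
      (pvACount w k L) h
    refine ⟨tab', pvRoll w tab' L h', ?_⟩
    rw [heq']
    simp only [pvACount]
    rw [Finset.sum_range_succ]

lemma pvA_eq (word : String) (k : Int) :
    get_almost_palindrom_count word k = pvACount word.toList k word.toList.length := by
  obtain ⟨tab, _, heq⟩ := pvOuterFold word.toList k word.toList.length le_rfl
  show (List.foldl (fun st x => List.foldl (pvStepA word.toList k x) st
      (PySem.List.pyRange 0 ((word.toList.length : Int) - x + 1) 1))
      ((PySem.List.pyRange 0 (word.toList.length : Int) 1).map
        (fun _ => (PySem.List.pyRange 0 (word.toList.length : Int) 1).map (fun _ => (0 : Int))),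
        (0 : Int))
      (PySem.List.pyRange 1 ((word.toList.length : Int) + 1) 1)).2
    = pvACount word.toList k word.toList.length
  have hr : PySem.List.pyRange 1 ((word.toList.length : Int) + 1) 1
      = (List.range word.toList.length).map (fun x : Nat => 1 + (x : Int)) := by
    have ht : (((word.toList.length : Int) + 1) - 1).toNat = word.toList.length := by omega
    rw [PySem.List.pyRange_one, ht]
  rw [hr]
  exact congrArg Prod.snd heq

lemma pvSplitGap (w : List Char) (k : Int) (gap : Nat) (hg : gap ≤ 1) :
    ∑ x ∈ ((Finset.range w.length).sigma (fun l => Finset.range (w.length - l))).filter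
        (fun x => x.1 % 2 = gap), pvCnt w k x.2 (x.2 + x.1)
    = pvSide w k gap := by
  have h2 : pvSide w k gap = ∑ x ∈ (Finset.range (w.length - gap)).sigma
      (fun c => Finset.range (min (c + 1) (w.length - (c + gap)))),
      pvCnt w k (x.1 + 1 - 1 - x.2) (x.1 + gap + x.2) := by
    rw [pvSide]
    simp only [pvArmE]
    exact Finset.sum_sigma' _ _ _
  rw [h2]
  refine Finset.sum_nbij' (fun x => ⟨x.2 + x.1 / 2, x.1 / 2⟩)
    (fun y => ⟨2 * y.2 + gap, y.1 - y.2⟩) ?_ ?_ ?_ ?_ ?_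
  · intro x hx
    simp only [Finset.mem_filter, Finset.mem_sigma, Finset.mem_range] at hx ⊢
    omega
  · intro y hy
    simp only [Finset.mem_filter, Finset.mem_sigma, Finset.mem_range] at hy ⊢
    omega
  · intro x hx
    simp only [Finset.mem_filter, Finset.mem_sigma, Finset.mem_range] at hx
    refine Sigma.ext ?_ (heq_of_eq ?_)
    · simp; omega
    · simp
  · intro y hy
    simp only [Finset.mem_sigma, Finset.mem_range] at hy
    refine Sigma.ext ?_ (heq_of_eq ?_)
    · simp; omega
    · simp; omega
  · intro x hx
    simp only [Finset.mem_filter, Finset.mem_sigma, Finset.mem_range] at hx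
    have e1 : x.2 = x.2 + x.1 / 2 + 1 - 1 - x.1 / 2 := by omega
    have e2 : x.2 + x.1 = x.2 + x.1 / 2 + gap + x.1 / 2 := by omega
    rw [← e1, ← e2]

lemma pvSplit (w : List Char) (k : Int) :
    pvACount w k w.length = pvSide w k 0 + pvSide w k 1 := by
  rw [pvACount, Finset.sum_sigma']
  rw [← Finset.sum_filter_add_sum_filter_not
    ((Finset.range w.length).sigma (fun l => Finset.range (w.length - l)))
    (fun x => x.1 % 2 = 0) (fun x => pvCnt w k x.2 (x.2 + x.1))]
  congr 1
  · exact pvSplitGap w k 0 (by omega)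
  · rw [Finset.filter_congr (q := fun x => x.1 % 2 = 1) (fun x _ => by omega)]
    exact pvSplitGap w k 1 (by omega)

-- ===== VERDICT (by name: the statement is the Claim_ definition above) =====
theorem get_almost_palindrom_count_spec : Claim_equal_get_almost_palindrom_count := by
  intro word k _
  show get_almost_palindrom_count word k = get_almost_palindrom_count_alt word k
  rw [pvA_eq, pvSplit, pvAlt_eq]
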